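-- pv_equiv track=rewrite | github.com/Erland366/nanoVLM | evaluation/cider_utils.py | _discard_samples_that_are_too_long
-- ===== SOURCE A (Python) =====
-- def _discard_samples_that_are_too_long(batch, split_points, max_length):
--     filtered = []
--     filtered_split_points = []
--     for i in range(len(batch["input_ids"])):
--         seq = batch["input_ids"][i]
--         if len(seq) <= max_length:
--             filtered.append({k: batch[k][i] for k in batch})
--             filtered_split_points.append(split_points[i])
--     if not filtered:
--         return {k: [] for k in batch}, []
--     out = {k: [d[k] for d in filtered] for k in batch}
--     return out, filtered_split_points
-- ===== SOURCE B (Python) =====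
-- def _discard_samples_that_are_too_long(batch, split_points, max_length):
--     idx = [i for i in range(len(batch["input_ids"]))
--            if len(batch["input_ids"][i]) <= max_length]
--     out = {k: [batch[k][i] for i in idx] for k in batch}
--     return out, [split_points[i] for i in idx]
-- ===== Notes on version B (the rewrite author's own statement) =====
-- stated objective: simpler
-- what changed: B computes the list of kept indices in one pass and gathers each column (and the split points) directly by those indices, eliminating A's intermediate list of per-sample dicts and its separate empty-batch branch.
import Mathlib
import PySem

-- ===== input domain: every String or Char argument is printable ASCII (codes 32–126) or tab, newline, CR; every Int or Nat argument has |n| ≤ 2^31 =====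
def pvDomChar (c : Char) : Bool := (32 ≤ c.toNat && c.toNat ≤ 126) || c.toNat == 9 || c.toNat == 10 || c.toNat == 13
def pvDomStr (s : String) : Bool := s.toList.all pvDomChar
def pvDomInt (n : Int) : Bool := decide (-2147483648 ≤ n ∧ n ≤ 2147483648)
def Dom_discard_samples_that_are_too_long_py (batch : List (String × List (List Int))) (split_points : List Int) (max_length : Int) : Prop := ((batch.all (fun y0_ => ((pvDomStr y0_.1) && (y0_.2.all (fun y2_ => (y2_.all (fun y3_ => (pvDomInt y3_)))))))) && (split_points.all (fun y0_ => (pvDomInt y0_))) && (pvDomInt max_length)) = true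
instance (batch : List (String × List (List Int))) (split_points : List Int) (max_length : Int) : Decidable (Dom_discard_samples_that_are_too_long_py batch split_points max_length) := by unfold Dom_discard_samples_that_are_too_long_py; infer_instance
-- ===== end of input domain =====

-- B gathers each column directly through a precomputed list of kept indices instead of
-- building A's intermediate list of per-sample dicts; objective: simpler (no speed claim).

-- ===== PORT A =====
-- shared helper: Python's first-match dict lookup on an association list (batch[k]),
-- with a default used only outside Pre_ (where the Python raises KeyError/IndexError)
def pyLookup {β : Type} (l : List (String × β)) (k : String) (d : β) : β :=
  match l with
  | [] => d
  | (k', v) :: t => if k' == k then v else pyLookup t k d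

-- literal transliteration of A: loop over range(n), append a per-sample dict and the
-- split point when the sample is short enough, then rebuild the columns from those dicts
def discard_samples_that_are_too_long_py (batch : List (String × List (List Int))) (split_points : List Int) (max_length : Int) : (List (String × List (List Int))) × List Int :=
  let ids := pyLookup batch "input_ids" []
  let acc := (List.range ids.length).foldl
    (fun (acc : List (List (String × List Int)) × List Int) i =>
      let seq := ids.getD i []
      if (seq.length : Int) ≤ max_length then
        (acc.1 ++ [batch.map (fun kv => (kv.1, (pyLookup batch kv.1 []).getD i []))],
         acc.2 ++ [split_points.getD i 0])
      else acc)
    ([], [])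
  if acc.1 = [] then (batch.map (fun kv => (kv.1, [])), [])
  else (batch.map (fun kv => (kv.1, acc.1.map (fun d => pyLookup d kv.1 []))), acc.2)

-- ===== PORT B =====
-- literal transliteration of B: kept-index list, then direct gathers
def discard_samples_that_are_too_long_py_alt (batch : List (String × List (List Int))) (split_points : List Int) (max_length : Int) : (List (String × List (List Int))) × List Int :=
  let ids := pyLookup batch "input_ids" []
  let idx := (List.range ids.length).filter (fun i => ((ids.getD i []).length : Int) ≤ max_length)
  (batch.map (fun kv => (kv.1, idx.map (fun i => (pyLookup batch kv.1 []).getD i []))),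
   idx.map (fun i => split_points.getD i 0))

-- ===== PRECONDITION & SPEC =====
-- Pre_ is exactly "the Python returns": the "input_ids" key is present, and every kept index i
-- is in range for split_points and for every column; the Nodup conjunct only excludes
-- association lists with duplicate keys, which do not represent a Python dict at all.
def Pre_discard_samples_that_are_too_long_py (batch : List (String × List (List Int))) (split_points : List Int) (max_length : Int) : Prop :=
  (batch.map Prod.fst).Nodup ∧ "input_ids" ∈ batch.map Prod.fst ∧
  (let ids := pyLookup batch "input_ids" []
   ∀ i < ids.length, ((ids.getD i []).length : Int) ≤ max_length →
     i < split_points.length ∧ ∀ kv ∈ batch, i < kv.2.length)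
instance (batch : List (String × List (List Int))) (split_points : List Int) (max_length : Int) : Decidable (Pre_discard_samples_that_are_too_long_py batch split_points max_length) := by unfold Pre_discard_samples_that_are_too_long_py; infer_instance

def pvWitness_discard_samples_that_are_too_long_py : (List (String × List (List Int))) × List Int × Int :=
  ([("input_ids", [[1, 2], [1, 2, 3]]), ("labels", [[7], [8]])], [10, 20], 2)

def Spec_discard_samples_that_are_too_long_py (batch : List (String × List (List Int))) (split_points : List Int) (max_length : Int) (out : (List (String × List (List Int))) × List Int) : Prop := out = discard_samples_that_are_too_long_py_alt batch split_points max_length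
instance (batch : List (String × List (List Int))) (split_points : List Int) (max_length : Int) (out : (List (String × List (List Int))) × List Int) : Decidable (Spec_discard_samples_that_are_too_long_py batch split_points max_length out) := by unfold Spec_discard_samples_that_are_too_long_py; infer_instance

-- ===== CLAIM (what is proved, stated in full; the proofs are below) =====
def Claim_equal_discard_samples_that_are_too_long_py : Prop := ∀ (batch : List (String × List (List Int))) (split_points : List Int) (max_length : Int), Dom_discard_samples_that_are_too_long_py batch split_points max_length → Pre_discard_samples_that_are_too_long_py batch split_points max_length → Spec_discard_samples_that_are_too_long_py batch split_points max_length (discard_samples_that_are_too_long_py batch split_points max_length)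

-- ===== LEMMAS AND PROOFS =====

-- A's foldl over range(n) builds exactly the filtered-index gathers, for any tail and accumulators
theorem foldlStep_eq {α β : Type} (p : Nat → Prop) [DecidablePred p] (f : Nat → α) (g : Nat → β)
    (l : List Nat) (a1 : List α) (a2 : List β) :
    l.foldl (fun acc i => if p i then (acc.1 ++ [f i], acc.2 ++ [g i]) else acc) (a1, a2)
      = (a1 ++ (l.filter (fun i => decide (p i))).map f, a2 ++ (l.filter (fun i => decide (p i))).map g) := by
  induction l generalizing a1 a2 with
  | nil => simp
  | cons h t ih =>
    by_cases hp : p h <;> simp [hp, ih]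

-- first-match lookup in a list of the shape map (fun kv => (kv.1, g kv.1)) returns g k for present keys
theorem pyLookup_map {β γ : Type} (l : List (String × β)) (g : String → γ) (k : String)
    (hk : k ∈ l.map Prod.fst) (d : γ) :
    pyLookup (l.map (fun kv => (kv.1, g kv.1))) k d = g k := by
  induction l with
  | nil => simp at hk
  | cons h t ih =>
    by_cases he : h.1 = k
    · simp [pyLookup, he]
    · have : k ∈ t.map Prod.fst := by
        simp at hk; rcases hk with hk | hk
        · exact absurd hk.symm he
        · simpa using hk
      simp [pyLookup, he, ih this]

theorem discard_spec_aux (batch : List (String × List (List Int))) (split_points : List Int) (max_length : Int) :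
    discard_samples_that_are_too_long_py batch split_points max_length
      = discard_samples_that_are_too_long_py_alt batch split_points max_length := by
  unfold discard_samples_that_are_too_long_py discard_samples_that_are_too_long_py_alt
  dsimp only
  set ids := pyLookup batch "input_ids" [] with hids
  set idx := (List.range ids.length).filter (fun i => decide (((ids.getD i []).length : Int) ≤ max_length)) with hidx
  have hfold := foldlStep_eq (fun i => ((ids.getD i []).length : Int) ≤ max_length)
      (fun i => batch.map (fun kv => (kv.1, (pyLookup batch kv.1 []).getD i [])))
      (fun i => split_points.getD i 0) (List.range ids.length) [] []
  simp only [List.nil_append] at hfold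
  rw [hfold, ← hidx]
  by_cases hempty : idx = []
  · simp [hempty]
  · have hne : idx.map (fun i => batch.map (fun kv => (kv.1, (pyLookup batch kv.1 []).getD i []))) ≠ [] := by
      simpa using hempty
    simp only [if_neg hne]
    refine Prod.ext ?_ rfl
    apply List.map_congr_left
    intro kv hkv
    refine Prod.ext rfl ?_
    simp only [List.map_map]
    apply List.map_congr_left
    intro i _
    exact pyLookup_map batch (fun k => (pyLookup batch k []).getD i []) kv.1
      (List.mem_map_of_mem hkv) []

-- ===== VERDICT (by name: the statement is the Claim_ definition above) =====
theorem discard_samples_that_are_too_long_py_spec : Claim_equal_discard_samples_that_are_too_long_py := by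
  intro batch split_points max_length _ _
  exact discard_spec_aux batch split_points max_length
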